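-- pv_equiv track=rewrite | github.com/bhubesh757/Hackerrank_30_days_of_code | Interview Kit/Triple_sum.py | triplets
-- ===== SOURCE A (Python) =====
-- def triplets(a, b, c):
--     a=  sorted(set(a))
--     b=  sorted(set(b))
--     c=  sorted(set(c))
--
--     count = m = n = 0
--
--     # loop the value
--
--     for value in b:
--         while m < len(a) and a[m] <= value :
--             m = m+1
--         while n < len(c) and c[n] <= value:
--             n = n+1
--         count = count + m*n
--     return count
-- ===== SOURCE B (Python) =====
-- def _bisect_right(xs, v):
--     lo, hi = 0, len(xs)
--     while lo < hi:
--         mid = (lo + hi) // 2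
--         if v < xs[mid]:
--             hi = mid
--         else:
--             lo = mid + 1
--     return lo
--
--
-- def triplets(a, b, c):
--     a = sorted(set(a))
--     b = sorted(set(b))
--     c = sorted(set(c))
--     count = 0
--     for value in b:
--         count += _bisect_right(a, value) * _bisect_right(c, value)
--     return count
-- ===== Notes on version B (the rewrite author's own statement) =====
-- stated objective: alternative
-- what changed: Replaces A's coordinated monotonic two-pointer sweep (stateful m,n carried across b-values) with an independent binary search into sorted a and c for each distinct b-value, summing the products.
import Mathlib
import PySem

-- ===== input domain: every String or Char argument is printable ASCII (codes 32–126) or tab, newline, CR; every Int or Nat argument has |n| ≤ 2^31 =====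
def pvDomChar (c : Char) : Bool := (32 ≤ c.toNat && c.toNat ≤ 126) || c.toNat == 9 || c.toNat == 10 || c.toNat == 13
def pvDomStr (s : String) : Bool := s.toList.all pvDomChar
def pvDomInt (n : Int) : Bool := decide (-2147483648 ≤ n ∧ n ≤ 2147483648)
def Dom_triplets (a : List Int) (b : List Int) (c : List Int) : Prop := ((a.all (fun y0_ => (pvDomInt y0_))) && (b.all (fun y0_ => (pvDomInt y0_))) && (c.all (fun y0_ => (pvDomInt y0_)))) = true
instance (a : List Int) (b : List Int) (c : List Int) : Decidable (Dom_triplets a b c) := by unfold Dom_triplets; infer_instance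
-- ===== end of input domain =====

-- B replaces A's stateful two-pointer sweep over b by an independent binary search per b-value; same results, similar cost.

-- ===== PORT A =====
-- the inner 'while m < len(a) and a[m] <= value: m += 1' loop of A
def pvAdvance (xs : List Int) (v : Int) (m : Nat) : Nat :=
  if h : m < xs.length then
    if xs[m] ≤ v then pvAdvance xs v (m + 1) else m
  else m
termination_by xs.length - m

def triplets (a : List Int) (b : List Int) (c : List Int) : Int :=
  let a' := PySem.List.sorted (PySem.Set.ofList a) (fun x => x)
  let b' := PySem.List.sorted (PySem.Set.ofList b) (fun x => x)
  let c' := PySem.List.sorted (PySem.Set.ofList c) (fun x => x)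
  (b'.foldl (fun (s : Int × Nat × Nat) value =>
      let m := pvAdvance a' value s.2.1
      let n := pvAdvance c' value s.2.2
      (s.1 + (m : Int) * (n : Int), m, n)) (0, 0, 0)).1

-- ===== PORT B =====
-- the hand-written binary search _bisect_right of Source B ('else lo' guard only makes indexing total)
def pvBsr (xs : List Int) (v : Int) (lo hi : Nat) : Nat :=
  if hlt : lo < hi then
    let mid := (lo + hi) / 2
    if h : mid < xs.length then
      if v < xs[mid] then pvBsr xs v lo mid else pvBsr xs v (mid + 1) hi
    else lo
  else lo
termination_by hi - lo
decreasing_by all_goals omega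

def pvBisectRight (xs : List Int) (v : Int) : Nat := pvBsr xs v 0 xs.length

def triplets_alt (a : List Int) (b : List Int) (c : List Int) : Int :=
  let a' := PySem.List.sorted (PySem.Set.ofList a) (fun x => x)
  let b' := PySem.List.sorted (PySem.Set.ofList b) (fun x => x)
  let c' := PySem.List.sorted (PySem.Set.ofList c) (fun x => x)
  b'.foldl (fun count value =>
      count + (pvBisectRight a' value : Int) * (pvBisectRight c' value : Int)) 0

-- ===== PRECONDITION & SPEC =====
def Spec_triplets (a : List Int) (b : List Int) (c : List Int) (out : Int) : Prop := out = triplets_alt a b c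
instance (a : List Int) (b : List Int) (c : List Int) (out : Int) : Decidable (Spec_triplets a b c out) := by unfold Spec_triplets; infer_instance

-- ===== CLAIM (what is proved, stated in full; the proofs are below) =====
def Claim_equal_triplets : Prop := ∀ (a : List Int) (b : List Int) (c : List Int), Dom_triplets a b c → Spec_triplets a b c (triplets a b c)

-- ===== LEMMAS AND PROOFS =====

-- "r is the right bisection point of v in xs"
def IsBp (xs : List Int) (v : Int) (r : Nat) : Prop :=
  r ≤ xs.length ∧ (∀ j (hj : j < xs.length), j < r → xs[j] ≤ v) ∧
    (∀ j (hj : j < xs.length), r ≤ j → v < xs[j])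

theorem isBp_unique {xs : List Int} {v : Int} {r₁ r₂ : Nat}
    (h₁ : IsBp xs v r₁) (h₂ : IsBp xs v r₂) : r₁ = r₂ := by
  obtain ⟨hl₁, ha₁, hb₁⟩ := h₁
  obtain ⟨hl₂, ha₂, hb₂⟩ := h₂
  by_contra hne
  rcases Nat.lt_or_ge r₁ r₂ with h | h
  · have hlt : r₁ < xs.length := lt_of_lt_of_le h hl₂
    exact absurd (ha₂ r₁ hlt h) (not_le.mpr (hb₁ r₁ hlt le_rfl))
  · have h2 : r₂ < r₁ := by omega
    have hlt : r₂ < xs.length := lt_of_lt_of_le h2 hl₁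
    exact absurd (ha₁ r₂ hlt h2) (not_le.mpr (hb₂ r₂ hlt le_rfl))

theorem pairwise_getElem_mono {xs : List Int} (hs : xs.Pairwise (· ≤ ·))
    {i j : Nat} (hij : i ≤ j) (hj : j < xs.length) : xs[i]'(by omega) ≤ xs[j] := by
  rcases Nat.lt_or_eq_of_le hij with h | h
  · exact List.pairwise_iff_getElem.mp hs i j (by omega) hj h
  · subst h; exact le_refl _

theorem pvBsr_isBp (xs : List Int) (hs : xs.Pairwise (· ≤ ·)) (v : Int) :
    ∀ k lo hi, hi - lo = k → lo ≤ hi → hi ≤ xs.length →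
      (∀ j (hj : j < xs.length), j < lo → xs[j] ≤ v) →
      (∀ j (hj : j < xs.length), hi ≤ j → v < xs[j]) →
      IsBp xs v (pvBsr xs v lo hi) := by
  intro k
  induction k using Nat.strong_induction_on with
  | _ k ih =>
    intro lo hi hk hlohi hhi hlo hhi'
    rw [pvBsr]
    split
    · next hlt =>
      have hmid : (lo + hi) / 2 < xs.length := by omega
      simp only [hmid, dif_pos]
      split
      · next hv =>
        exact ih ((lo + hi) / 2 - lo) (by omega) lo _ rfl (by omega) (by omega) hlo
          (fun j hj hge => lt_of_lt_of_le hv (pairwise_getElem_mono hs hge hj))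
      · next hv =>
        exact ih (hi - ((lo + hi) / 2 + 1)) (by omega) _ hi rfl (by omega) hhi
          (fun j hj hjl => le_trans (pairwise_getElem_mono hs (by omega) hmid) (not_lt.mp hv))
          hhi'
    · next hge =>
      refine ⟨by omega, fun j hj hjl => hlo j hj hjl, fun j hj hjl => hhi' j hj (by omega)⟩

theorem pvBisectRight_isBp (xs : List Int) (hs : xs.Pairwise (· ≤ ·)) (v : Int) :
    IsBp xs v (pvBisectRight xs v) :=
  pvBsr_isBp xs hs v _ 0 xs.length rfl (by omega) le_rfl (by omega) (by omega)

theorem pvAdvance_isBp (xs : List Int) (hs : xs.Pairwise (· ≤ ·)) (v : Int) :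
    ∀ k m, xs.length - m = k → m ≤ xs.length →
      (∀ j (hj : j < xs.length), j < m → xs[j] ≤ v) →
      IsBp xs v (pvAdvance xs v m) := by
  intro k
  induction k using Nat.strong_induction_on with
  | _ k ih =>
    intro m hk hm hpre
    rw [pvAdvance]
    split
    · next hlt =>
      split
      · next hv =>
        exact ih (xs.length - (m + 1)) (by omega) (m + 1) rfl (by omega)
          (fun j hj hjl => by
            rcases Nat.lt_or_eq_of_le (Nat.lt_succ_iff.mp hjl) with h | h
            · exact hpre j hj h
            · subst h; exact hv)
      · next hv =>
        exact ⟨hm, hpre, fun j hj hjl =>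
          lt_of_lt_of_le (not_le.mp hv) (pairwise_getElem_mono hs hjl hj)⟩
    · next hge =>
      exact ⟨hm, hpre, fun j hj hjl => by omega⟩

theorem pvAdvance_eq_bisect (xs : List Int) (hs : xs.Pairwise (· ≤ ·)) (v : Int)
    (m : Nat) (hm : m ≤ xs.length)
    (hpre : ∀ j (hj : j < xs.length), j < m → xs[j] ≤ v) :
    pvAdvance xs v m = pvBisectRight xs v :=
  isBp_unique (pvAdvance_isBp xs hs v _ m rfl hm hpre) (pvBisectRight_isBp xs hs v)

-- the two loops over b' agree, given the monotone-pointer invariant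
theorem foldl_sweep_eq (a' c' : List Int) (ha : a'.Pairwise (· ≤ ·)) (hc : c'.Pairwise (· ≤ ·)) :
    ∀ (bs : List Int), bs.Pairwise (· ≤ ·) →
      ∀ (count : Int) (m n : Nat), m ≤ a'.length → n ≤ c'.length →
      (∀ v ∈ bs, ∀ j (hj : j < a'.length), j < m → a'[j] ≤ v) →
      (∀ v ∈ bs, ∀ j (hj : j < c'.length), j < n → c'[j] ≤ v) →
      (bs.foldl (fun (s : Int × Nat × Nat) value =>
          let m' := pvAdvance a' value s.2.1
          let n' := pvAdvance c' value s.2.2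
          (s.1 + (m' : Int) * (n' : Int), m', n')) (count, m, n)).1 =
      bs.foldl (fun count value =>
          count + (pvBisectRight a' value : Int) * (pvBisectRight c' value : Int)) count := by
  intro bs
  induction bs with
  | nil => intro _ count m n _ _ _ _; rfl
  | cons v t ihb =>
    intro hbs count m n hm hn hma hmc
    simp only [List.foldl_cons]
    have hva : pvAdvance a' v m = pvBisectRight a' v :=
      pvAdvance_eq_bisect a' ha v m hm (fun j hj hjl => hma v (List.mem_cons_self) j hj hjl)
    have hvc : pvAdvance c' v n = pvBisectRight c' v :=
      pvAdvance_eq_bisect c' hc v n hn (fun j hj hjl => hmc v (List.mem_cons_self) j hj hjl)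
    obtain ⟨hla, hpa, _⟩ := pvBisectRight_isBp a' ha v
    obtain ⟨hlc, hpc, _⟩ := pvBisectRight_isBp c' hc v
    have hvt : ∀ w ∈ t, v ≤ w := fun w hw => (List.pairwise_cons.mp hbs).1 w hw
    simp only [hva, hvc]
    exact ihb (List.pairwise_cons.mp hbs).2 _ _ _ hla hlc
      (fun w hw j hj hjl => le_trans (hpa j hj hjl) (hvt w hw))
      (fun w hw j hj hjl => le_trans (hpc j hj hjl) (hvt w hw))

-- ===== VERDICT (by name: the statement is the Claim_ definition above) =====
theorem triplets_spec : Claim_equal_triplets := by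
  intro a b c _
  unfold Spec_triplets triplets triplets_alt
  have pw : ∀ (xs : List Int),
      (PySem.List.sorted (PySem.Set.ofList xs) (fun x => x)).Pairwise (· ≤ ·) :=
    fun xs => (PySem.List.sorted_ofList_pairwise_lt xs).imp (fun h => le_of_lt h)
  exact foldl_sweep_eq _ _ (pw a) (pw c) _ (pw b) 0 0 0 (by omega) (by omega)
    (fun _ _ j _ hj => by omega) (fun _ _ j _ hj => by omega)
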